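-- pv_equiv track=rewrite | github.com/innewiadro/Codewars | kata_level7/Paul's_misery/Paul's_misery.py | paul
-- ===== SOURCE A (Python) =====
-- def paul(x):
--     tab = {"kata": 5,
--            'eating': 1,
--            'Petes kata': 10,
--            'life': 0}
--     res = 0
--
--     for i in x:
--         if i in tab:
--             res += tab[i]
--
--     if res < 40:
--         return "Super happy!"
--     elif res <= 70:
--         return "Happy!"
--     elif res > 70 and res <= 100:
--         return "Sad!"
--     else:
--         return "Miserable!"
-- ===== SOURCE B (Python) =====
-- def paul(x):
--     tab = {"kata": 5,
--            'eating': 1,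
--            'Petes kata': 10,
--            'life': 0}
--     counts = {}
--     for i in x:
--         counts[i] = counts.get(i, 0) + 1
--     res = sum(w * counts.get(t, 0) for t, w in tab.items())
--     for limit, mood in ((39, "Super happy!"), (70, "Happy!"), (100, "Sad!")):
--         if res <= limit:
--             return mood
--     return "Miserable!"
-- ===== Notes on version B (the rewrite author's own statement) =====
-- stated objective: alternative
-- what changed: B builds a frequency map of the input in one pass and then accumulates the score by scanning the fixed 4-entry weight table (weight times count), replacing A's per-element dict membership test and lookup; the threshold ladder becomes a table scan.
import Mathlib
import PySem

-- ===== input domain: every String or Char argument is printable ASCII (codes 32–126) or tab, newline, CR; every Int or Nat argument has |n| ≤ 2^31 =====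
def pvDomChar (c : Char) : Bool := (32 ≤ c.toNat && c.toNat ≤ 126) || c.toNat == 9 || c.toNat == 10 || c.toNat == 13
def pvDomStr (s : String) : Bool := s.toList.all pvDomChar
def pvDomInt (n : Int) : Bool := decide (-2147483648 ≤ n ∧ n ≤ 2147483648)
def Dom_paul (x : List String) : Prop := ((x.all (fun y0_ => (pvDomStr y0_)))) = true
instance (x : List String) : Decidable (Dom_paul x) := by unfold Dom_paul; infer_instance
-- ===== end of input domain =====

-- B replaces A's per-element membership test with a frequency map consumed by a scan of the fixed weight table; alternative decomposition, same cost.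

-- ===== PORT A =====
def paulTab : PySem.Dict String Int :=
  PySem.Dict.ofList [("kata", 5), ("eating", 1), ("Petes kata", 10), ("life", 0)]

def paul (x : List String) : String :=
  let res := x.foldl (fun res i => if paulTab.contains i then res + paulTab.getD i 0 else res) 0
  if res < 40 then "Super happy!"
  else if res ≤ 70 then "Happy!"
  else if res > 70 ∧ res ≤ 100 then "Sad!"
  else "Miserable!"

-- ===== PORT B =====
def paul_alt (x : List String) : String :=
  let counts := x.foldl (fun d i => d.insert i (d.getD i 0 + 1)) PySem.Dict.empty
  let res := paulTab.items.foldl (fun acc p => acc + p.2 * counts.getD p.1 0) 0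
  let ladder : List (Int × String) := [(39, "Super happy!"), (70, "Happy!"), (100, "Sad!")]
  match ladder.find? (fun p => res ≤ p.1) with
  | some p => p.2
  | none => "Miserable!"

-- ===== PRECONDITION & SPEC =====
def Spec_paul (x : List String) (out : String) : Prop := out = paul_alt x
instance (x : List String) (out : String) : Decidable (Spec_paul x out) := by unfold Spec_paul; infer_instance

-- ===== CLAIM (what is proved, stated in full; the proofs are below) =====
def Claim_equal_paul : Prop := ∀ (x : List String), Dom_paul x → Spec_paul x (paul x)

-- ===== LEMMAS AND PROOFS =====

def paulWeight (i : String) : Int := if paulTab.contains i then paulTab.getD i 0 else 0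

lemma paul_foldl_eq (x : List String) (r : Int) :
    x.foldl (fun res i => if paulTab.contains i then res + paulTab.getD i 0 else res) r
      = r + (x.map paulWeight).sum := by
  induction x generalizing r with
  | nil => simp
  | cons i t ih =>
    simp only [List.foldl_cons, List.map_cons, List.sum_cons, ih, paulWeight]
    split_ifs <;> ring

lemma paulTab_items : paulTab.items = [("kata", 5), ("eating", 1), ("Petes kata", 10), ("life", 0)] := by
  rfl

lemma paulWeight_eq (i : String) :
    paulWeight i = 5 * (if i = "kata" then 1 else 0) + 1 * (if i = "eating" then 1 else 0)
      + 10 * (if i = "Petes kata" then 1 else 0) := by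
  unfold paulWeight
  rw [PySem.Dict.contains, PySem.Dict.getD, PySem.Dict.get?, paulTab_items]
  by_cases h1 : i = "kata"
  · subst h1; decide
  by_cases h2 : i = "eating"
  · subst h2; decide
  by_cases h3 : i = "Petes kata"
  · subst h3; decide
  by_cases h4 : i = "life"
  · subst h4; decide
  simp [Ne.symm h1, Ne.symm h2, Ne.symm h3, Ne.symm h4, h1, h2, h3]

lemma paul_sum_eq (x : List String) :
    (x.map paulWeight).sum
      = 5 * (x.count "kata" : Int) + 1 * (x.count "eating" : Int)
        + 10 * (x.count "Petes kata" : Int) := by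
  induction x with
  | nil => simp
  | cons i t ih =>
    simp only [List.map_cons, List.sum_cons, ih, paulWeight_eq i]
    rw [List.count_cons, List.count_cons, List.count_cons]
    by_cases h1 : i = "kata" <;> by_cases h2 : i = "eating" <;> by_cases h3 : i = "Petes kata" <;>
      simp_all <;> ring

lemma paul_res_eq (x : List String) :
    x.foldl (fun res i => if paulTab.contains i then res + paulTab.getD i 0 else res) 0
      = paulTab.items.foldl
          (fun acc p => acc + p.2 * (x.foldl (fun d i => d.insert i (d.getD i 0 + 1)) PySem.Dict.empty).getD p.1 0) 0 := by
  rw [paul_foldl_eq, paul_sum_eq, paulTab_items]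
  simp only [List.foldl_cons, List.foldl_nil,
    PySem.Dict.getD_foldl_insert_add_one, PySem.Dict.getD_empty]
  ring

lemma paul_ladder_eq (res : Int) :
    (if res < 40 then "Super happy!"
     else if res ≤ 70 then "Happy!"
     else if res > 70 ∧ res ≤ 100 then "Sad!"
     else "Miserable!")
    = (match ([((39 : Int), "Super happy!"), (70, "Happy!"), (100, "Sad!")]).find? (fun p => res ≤ p.1) with
       | some p => p.2
       | none => "Miserable!") := by
  by_cases h1 : res ≤ 39
  · rw [if_pos (show res < 40 by omega)]; simp [List.find?, h1]
  · by_cases h2 : res ≤ 70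
    · rw [if_neg (show ¬ res < 40 by omega), if_pos h2]; simp [List.find?, h1, h2]
    · by_cases h3 : res ≤ 100
      · rw [if_neg (show ¬ res < 40 by omega), if_neg h2,
          if_pos (show res > 70 ∧ res ≤ 100 from ⟨by omega, h3⟩)]
        simp [List.find?, h1, h2, h3]
      · rw [if_neg (show ¬ res < 40 by omega), if_neg h2,
          if_neg (show ¬ (res > 70 ∧ res ≤ 100) by omega)]
        simp [List.find?, h1, h2, h3]

-- ===== VERDICT (by name: the statement is the Claim_ definition above) =====
theorem paul_spec : Claim_equal_paul := by
  intro x _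
  unfold Spec_paul paul paul_alt
  rw [paul_res_eq]
  exact paul_ladder_eq _
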